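-- pv_equiv track=rewrite | github.com/Khaniixx/companion-os | services/agent-runtime/app/skills/micro_utilities.py | _parse_shortcut_request
-- ===== SOURCE A (Python) =====
-- def _parse_shortcut_request(request_text: str) -> str | None:
--     lowered_request = request_text.lower()
--     for prefix in ("run shortcut ", "launch shortcut ", "open shortcut "):
--         if lowered_request.startswith(prefix):
--             shortcut_id = request_text[len(prefix) :].strip()
--             if not shortcut_id:
--                 raise ValueError("Shortcut name cannot be empty.")
--             return shortcut_id
--     return None
-- ===== SOURCE B (Python) =====
-- def _parse_shortcut_request(request_text: str) -> str | None:
--     head, sep, _tail = request_text.lower().partition(" shortcut ")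
--     if not sep or head not in ("run", "launch", "open"):
--         return None
--     shortcut_id = request_text[len(head) + len(sep):].strip()
--     if not shortcut_id:
--         raise ValueError("Shortcut name cannot be empty.")
--     return shortcut_id
-- ===== Notes on version B (the rewrite author's own statement) =====
-- stated objective: idiomatic
-- what changed: Replaces the loop over three prefix strings with a single partition of the lowered text at the first ' shortcut ' separator followed by a membership test of the verb before it.
import Mathlib
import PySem

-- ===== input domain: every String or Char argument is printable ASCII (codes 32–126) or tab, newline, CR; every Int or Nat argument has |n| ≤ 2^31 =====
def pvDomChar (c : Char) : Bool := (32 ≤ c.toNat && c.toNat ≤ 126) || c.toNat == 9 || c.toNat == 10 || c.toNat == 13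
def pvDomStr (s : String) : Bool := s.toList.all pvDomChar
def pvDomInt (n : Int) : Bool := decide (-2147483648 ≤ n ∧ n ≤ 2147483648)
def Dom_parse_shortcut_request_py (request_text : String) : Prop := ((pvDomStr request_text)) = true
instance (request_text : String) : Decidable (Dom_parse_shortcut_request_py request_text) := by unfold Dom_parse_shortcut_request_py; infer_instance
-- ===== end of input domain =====

-- B replaces A's loop over three prefixes by one partition at the first " shortcut " plus a verb membership test (idiomatic; same cost).
-- Where A raises ValueError (matched prefix, remainder strips to empty) B raises the same ValueError; those inputs are outside Pre_.

-- ===== PORT A =====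
-- the for-loop over the prefix tuple; on the raise path (empty stripped remainder, excluded by Pre_) the port returns none
def pvLoopA (request_text lowered : String) : List String → Option String
  | [] => none
  | p :: ps =>
    if PySem.Str.startswith lowered p then
      let shortcut_id := PySem.Str.strip (PySem.Str.slice request_text (some (PySem.Str.len p)) none)
      if shortcut_id = "" then none else some shortcut_id
    else pvLoopA request_text lowered ps

def parse_shortcut_request_py (request_text : String) : Option String :=
  let lowered := PySem.Str.lower request_text
  pvLoopA request_text lowered ["run shortcut ", "launch shortcut ", "open shortcut "]

-- ===== PORT B =====
-- str.partition(sep) ported by hand via Str.find (exact: partition splits at the FIRST occurrence;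
-- no occurrence ↔ find = -1 ↔ the sep part of partition is empty)
def parse_shortcut_request_py_alt (request_text : String) : Option String :=
  let lowered := PySem.Str.lower request_text
  let sep : String := " shortcut "
  let i := PySem.Str.find lowered sep
  if i = -1 then none
  else
    let head := PySem.Str.slice lowered none (some i)
    if head = "run" ∨ head = "launch" ∨ head = "open" then
      let shortcut_id := PySem.Str.strip (PySem.Str.slice request_text (some (i + PySem.Str.len sep)) none)
      if shortcut_id = "" then none else some shortcut_id
    else none

-- ===== PRECONDITION & SPEC =====
-- Pre_ excludes exactly the inputs on which A raises ValueError (a prefix matches but the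
-- remainder strips to empty); B raises the same ValueError there.
def Pre_parse_shortcut_request_py (request_text : String) : Prop :=
  ∀ p ∈ (["run shortcut ", "launch shortcut ", "open shortcut "] : List String),
    PySem.Str.startswith (PySem.Str.lower request_text) p = true →
    PySem.Str.strip (PySem.Str.slice request_text (some (PySem.Str.len p)) none) ≠ ""
instance (request_text : String) : Decidable (Pre_parse_shortcut_request_py request_text) := by
  unfold Pre_parse_shortcut_request_py; infer_instance

def pvWitness_parse_shortcut_request_py : String := "run shortcut timer"

def Spec_parse_shortcut_request_py (request_text : String) (out : Option String) : Prop := out = parse_shortcut_request_py_alt request_text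
instance (request_text : String) (out : Option String) : Decidable (Spec_parse_shortcut_request_py request_text out) := by unfold Spec_parse_shortcut_request_py; infer_instance

-- ===== CLAIM (what is proved, stated in full; the proofs are below) =====
def Claim_equal_parse_shortcut_request_py : Prop := ∀ (request_text : String), Dom_parse_shortcut_request_py request_text → Pre_parse_shortcut_request_py request_text → Spec_parse_shortcut_request_py request_text (parse_shortcut_request_py request_text)

-- ===== LEMMAS AND PROOFS =====

-- a prefix of an append that fits inside the left part is a prefix of the left part
theorem pv_prefix_of_prefix_append {s a b : List Char} (h : s <+: a ++ b)
    (hl : s.length ≤ a.length) : s <+: a := by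
  rw [List.prefix_iff_eq_take] at h ⊢
  rwa [List.take_append_of_le_length hl] at h

-- find points at k when there is an occurrence at k and none before
theorem pv_find_eq (l sep : List Char) (k : Nat)
    (hocc : sep <+: l.drop k) (hmin : ∀ i < k, ¬ sep <+: l.drop i) :
    PySem.Chars.find l sep = (k : Int) := by
  have hin : sep <:+: l := hocc.isInfix.trans (List.drop_suffix k l).isInfix
  have hnn : 0 ≤ PySem.Chars.find l sep := (PySem.Chars.find_nonneg_iff l sep).mpr hin
  obtain ⟨ho, hm⟩ := PySem.Chars.find_spec hnn
  have hk : (PySem.Chars.find l sep).toNat = k := by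
    rcases lt_trichotomy (PySem.Chars.find l sep).toNat k with h | h | h
    · exact absurd ho (hmin _ h)
    · exact h
    · exact absurd hocc (hm _ h)
  omega

-- a matched prefix pre = verb ++ " shortcut " pins find to verb.length
theorem pv_find_matched (l pre : List Char) (k : Nat)
    (hlen : pre.length = k + 10)
    (hsep : pre.drop k = " shortcut ".toList)
    (hnone : ∀ i < k, ¬ (" shortcut ".toList) <+: pre.drop i)
    (hp : pre <+: l) :
    PySem.Chars.find l " shortcut ".toList = (k : Int) := by
  obtain ⟨rest, hrest⟩ := hp
  subst hrest
  apply pv_find_eq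
  · rw [List.drop_append_of_le_length (by omega), hsep]
    exact List.prefix_append _ _
  · intro i hi hpref
    rw [List.drop_append_of_le_length (by omega)] at hpref
    refine hnone i hi (pv_prefix_of_prefix_append hpref ?_)
    have h10 : (" shortcut ".toList).length = 10 := by decide
    rw [h10, List.length_drop, hlen]; omega

-- if find = i ≥ 0 and take i of l is the verb, then verb ++ " shortcut " is a prefix of l
theorem pv_head_forces_prefix (l verb : List Char)
    (hnn : 0 ≤ PySem.Chars.find l " shortcut ".toList)
    (hhead : l.take (PySem.Chars.find l " shortcut ".toList).toNat = verb) :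
    (verb ++ " shortcut ".toList) <+: l := by
  obtain ⟨ho, -⟩ := PySem.Chars.find_spec hnn
  have h1 : verb ++ l.drop (PySem.Chars.find l " shortcut ".toList).toNat = l := by
    conv_rhs => rw [← List.take_append_drop (PySem.Chars.find l " shortcut ".toList).toNat l]
    rw [hhead]
  obtain ⟨t, ht⟩ := ho
  exact ⟨t, by rw [List.append_assoc, ht, h1]⟩

-- B's value when one of the three prefixes matches the lowered text
theorem pv_alt_matched (rt verb : String) (k : Nat)
    (hk : verb.toList.length = k)
    (hmem : verb = "run" ∨ verb = "launch" ∨ verb = "open")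
    (hsepdrop : (verb ++ " shortcut ").toList.drop k = " shortcut ".toList)
    (hnone : ∀ i < k, ¬ (" shortcut ".toList) <+: (verb ++ " shortcut ").toList.drop i)
    (hsw : PySem.Str.startswith (PySem.Str.lower rt) (verb ++ " shortcut ") = true) :
    parse_shortcut_request_py_alt rt =
      (if PySem.Str.strip (PySem.Str.slice rt (some (PySem.Str.len (verb ++ " shortcut "))) none) = ""
       then none
       else some (PySem.Str.strip (PySem.Str.slice rt (some (PySem.Str.len (verb ++ " shortcut "))) none))) := by
  have hp : (verb ++ " shortcut ").toList <+: (PySem.Str.lower rt).toList := by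
    rw [PySem.Str.startswith_eq] at hsw
    exact (PySem.Chars.startswith_iff _ _).mp hsw
  have hlen : ((verb ++ " shortcut ").toList).length = k + 10 := by
    rw [String.toList_append, List.length_append, hk]; rfl
  have hfindC : PySem.Chars.find (PySem.Str.lower rt).toList (" shortcut " : String).toList = (k : Int) :=
    pv_find_matched _ _ k hlen hsepdrop hnone hp
  have hfind : PySem.Str.find (PySem.Str.lower rt) " shortcut " = (k : Int) := by
    rw [PySem.Str.find_eq]; exact hfindC
  have hhead : PySem.Str.slice (PySem.Str.lower rt) none (some ((k : Int))) = verb := by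
    apply String.toList_inj.mp
    rw [PySem.Str.toList_slice, PySem.Chars.slice_eq_listSlice,
        PySem.List.slice_to _ (by positivity), Int.toNat_natCast]
    obtain ⟨rest, hrest⟩ := hp
    rw [← hrest, String.toList_append, List.append_assoc,
        List.take_append_of_le_length (by omega), List.take_of_length_le (by omega)]
  have hlenp : PySem.Str.len (verb ++ " shortcut ") = (k : Int) + PySem.Str.len " shortcut " := by
    have h10 : (" shortcut " : String).toList.length = 10 := by decide
    rw [PySem.Str.len_eq, PySem.Str.len_eq, hlen, h10]
    push_cast; ring
  unfold parse_shortcut_request_py_alt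
  simp only [hfind, hhead, hlenp]
  have hkne : ((k : Int)) ≠ -1 := by omega
  rw [if_neg hkne, if_pos hmem]

-- B's value when no prefix matches the lowered text
theorem pv_alt_none (rt : String)
    (h1 : PySem.Str.startswith (PySem.Str.lower rt) "run shortcut " = false)
    (h2 : PySem.Str.startswith (PySem.Str.lower rt) "launch shortcut " = false)
    (h3 : PySem.Str.startswith (PySem.Str.lower rt) "open shortcut " = false) :
    parse_shortcut_request_py_alt rt = none := by
  unfold parse_shortcut_request_py_alt
  by_cases hf : PySem.Str.find (PySem.Str.lower rt) " shortcut " = -1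
  · simp only [hf]; rfl
  · have hnn : 0 ≤ PySem.Str.find (PySem.Str.lower rt) " shortcut " := by
      have := PySem.Str.find_eq (PySem.Str.lower rt) " shortcut "
      have hge := PySem.Chars.neg_one_le_find (PySem.Str.lower rt).toList (" shortcut " : String).toList
      omega
    have hnnC : 0 ≤ PySem.Chars.find (PySem.Str.lower rt).toList (" shortcut " : String).toList := by
      rw [← PySem.Str.find_eq]; exact hnn
    have hheadL : (PySem.Str.slice (PySem.Str.lower rt) none
        (some (PySem.Str.find (PySem.Str.lower rt) " shortcut "))).toList =
        (PySem.Str.lower rt).toList.take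
          (PySem.Chars.find (PySem.Str.lower rt).toList (" shortcut " : String).toList).toNat := by
      rw [PySem.Str.toList_slice, PySem.Chars.slice_eq_listSlice, PySem.Str.find_eq,
          PySem.List.slice_to _ hnnC]
    have hno : ∀ verb : String,
        PySem.Str.startswith (PySem.Str.lower rt) (verb ++ " shortcut ") = false →
        PySem.Str.slice (PySem.Str.lower rt) none
          (some (PySem.Str.find (PySem.Str.lower rt) " shortcut ")) ≠ verb := by
      intro verb hvf heq
      have hhead : (PySem.Str.lower rt).toList.take
          (PySem.Chars.find (PySem.Str.lower rt).toList (" shortcut " : String).toList).toNat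
          = verb.toList := by rw [← hheadL, heq]
      have hpre := pv_head_forces_prefix _ _ hnnC hhead
      have : PySem.Str.startswith (PySem.Str.lower rt) (verb ++ " shortcut ") = true := by
        rw [PySem.Str.startswith_eq]
        exact (PySem.Chars.startswith_iff _ _).mpr (by rwa [String.toList_append])
      rw [hvf] at this; exact Bool.false_ne_true this
  -- verbs do not match, so the membership test is false
    rw [if_neg hf, if_neg]
    push Not
    exact ⟨hno "run" h1, hno "launch" h2, hno "open" h3⟩

-- ===== VERDICT (by name: the statement is the Claim_ definition above) =====
theorem parse_shortcut_request_py_spec : Claim_equal_parse_shortcut_request_py := by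
  intro rt _ _
  unfold Spec_parse_shortcut_request_py
  simp only [parse_shortcut_request_py, pvLoopA]
  have e1 : ("run" ++ " shortcut " : String) = "run shortcut " := by decide
  have e2 : ("launch" ++ " shortcut " : String) = "launch shortcut " := by decide
  have e3 : ("open" ++ " shortcut " : String) = "open shortcut " := by decide
  by_cases h1 : PySem.Str.startswith (PySem.Str.lower rt) "run shortcut " = true
  · rw [pv_alt_matched rt "run" 3 (by decide) (Or.inl rfl) (by decide) (by decide) (by rw [e1]; exact h1),
        e1, if_pos h1]
  · rw [if_neg h1]
    by_cases h2 : PySem.Str.startswith (PySem.Str.lower rt) "launch shortcut " = true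
    · rw [pv_alt_matched rt "launch" 6 (by decide) (Or.inr (Or.inl rfl)) (by decide) (by decide)
          (by rw [e2]; exact h2), e2, if_pos h2]
    · rw [if_neg h2]
      by_cases h3 : PySem.Str.startswith (PySem.Str.lower rt) "open shortcut " = true
      · rw [pv_alt_matched rt "open" 4 (by decide) (Or.inr (Or.inr rfl)) (by decide) (by decide)
            (by rw [e3]; exact h3), e3, if_pos h3]
      · rw [if_neg h3, pv_alt_none rt (Bool.of_not_eq_true h1) (Bool.of_not_eq_true h2)
            (Bool.of_not_eq_true h3)]
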